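-- pv_equiv track=rewrite | github.com/jgausachs/python-challenge | PyBank/main.py | delta_max
-- ===== SOURCE A (Python) =====
-- def deltas(list_elements):
--     i = 0
--     list_of_deltas = []
--     for i in range(len(list_elements)-1):
--         list_of_deltas.append(int(list_elements[i+1])-int(list_elements[i]))
--     return (list_of_deltas)
--
-- def delta_max(list_elements):
--     list_for_max = deltas(list_elements)
--     max = -1000000
--     index_max = 0
--     for component in list_for_max:
--         if component > max:
--             max = component
--             index_max = list_for_max.index(max) + 1
--     return (index_max, max)
-- ===== SOURCE B (Python) =====
-- def delta_max(list_elements):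
--     best = -1000000
--     best_idx = 0
--     for i in range(len(list_elements) - 1):
--         d = int(list_elements[i + 1]) - int(list_elements[i])
--         if d > best:
--             best = d
--             best_idx = i + 1
--     return (best_idx, best)
-- ===== Notes on version B (the rewrite author's own statement) =====
-- stated objective: simpler
-- what changed: Single fused pass that computes each consecutive difference inline and tracks the running maximum and its index, instead of materializing the whole difference list and re-scanning it with list.index on every new maximum.
import Mathlib
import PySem

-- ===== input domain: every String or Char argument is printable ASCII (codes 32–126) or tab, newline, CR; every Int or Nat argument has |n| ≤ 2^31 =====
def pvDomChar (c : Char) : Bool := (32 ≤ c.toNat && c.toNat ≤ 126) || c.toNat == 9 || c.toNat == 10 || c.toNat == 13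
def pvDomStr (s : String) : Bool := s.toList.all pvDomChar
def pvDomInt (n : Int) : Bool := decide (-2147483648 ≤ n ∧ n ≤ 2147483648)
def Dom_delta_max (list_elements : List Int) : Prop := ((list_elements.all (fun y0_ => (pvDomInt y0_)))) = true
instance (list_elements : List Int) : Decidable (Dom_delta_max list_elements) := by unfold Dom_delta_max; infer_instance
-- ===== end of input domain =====

-- B fuses A's build-the-difference-list-then-rescan (list.index inside the loop) into a
-- single index-tracking pass over consecutive pairs, with the same return value (simpler).


-- ===== PORT A =====
-- helper 'deltas': builds the list of consecutive differences (int() on an int is the identity)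
def pv_deltas (list_elements : List Int) : List Int :=
  (PySem.List.pyRange 0 ((list_elements.length : Int) - 1) 1).foldl
    (fun acc i => acc ++ [PySem.List.pyGetD list_elements (i + 1) 0 - PySem.List.pyGetD list_elements i 0]) []

def delta_max (list_elements : List Int) : Int × Int :=
  let list_for_max := pv_deltas list_elements
  let s := list_for_max.foldl
    (fun (s : Int × Int) component =>
      if component > s.1 then
        (component, (((PySem.List.index? list_for_max component).getD 0 : Nat) : Int) + 1)
      else s)
    (-1000000, 0)
  (s.2, s.1)

-- ===== PORT B =====
def delta_max_alt (list_elements : List Int) : Int × Int :=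
  let s := (PySem.List.pyRange 0 ((list_elements.length : Int) - 1) 1).foldl
    (fun (s : Int × Int) i =>
      let d := PySem.List.pyGetD list_elements (i + 1) 0 - PySem.List.pyGetD list_elements i 0
      if d > s.1 then (d, i + 1) else s)
    (-1000000, 0)
  (s.2, s.1)

-- ===== PRECONDITION & SPEC =====
def Spec_delta_max (list_elements : List Int) (out : Int × Int) : Prop := out = delta_max_alt list_elements
instance (list_elements : List Int) (out : Int × Int) : Decidable (Spec_delta_max list_elements out) := by unfold Spec_delta_max; infer_instance

-- ===== CLAIM (what is proved, stated in full; the proofs are below) =====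
def Claim_equal_delta_max : Prop := ∀ (list_elements : List Int), Dom_delta_max list_elements → Spec_delta_max list_elements (delta_max list_elements)

-- ===== LEMMAS AND PROOFS =====

-- reference fold: scan a list of differences keeping a position counter j (0-based, next index is j+1)
def pvFoldB : List Int → Int → Int × Int → Int × Int
  | [], _, s => s
  | c :: t, j, s => pvFoldB t (j + 1) (if c > s.1 then (c, j + 1) else s)

lemma pv_deltas_eq_map (le : List Int) :
    pv_deltas le = (PySem.List.pyRange 0 ((le.length : Int) - 1) 1).map
      (fun i => PySem.List.pyGetD le (i + 1) 0 - PySem.List.pyGetD le i 0) := by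
  have gen : ∀ (l : List Int) (f : Int → Int), (l.map (fun x => [f x])).flatten = l.map f := by
    intro l f; induction l with
    | nil => rfl
    | cons a t ih => simp [ih]
  simp [pv_deltas, gen]

-- A's scan over the materialized list equals the counter-tracking fold, given that every
-- already-processed element is ≤ the running maximum (so list.index finds the current position).
lemma A_fold_eq (rest : List Int) : ∀ (p : List Int) (m k : Int) (ds : List Int),
    ds = p ++ rest → (∀ x ∈ p, x ≤ m) →
    rest.foldl
      (fun (s : Int × Int) c =>
        if c > s.1 then (c, (((PySem.List.index? ds c).getD 0 : Nat) : Int) + 1) else s)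
      (m, k) = pvFoldB rest (p.length : Int) (m, k) := by
  induction rest with
  | nil => intro p m k ds _ _; simp [pvFoldB]
  | cons c t ih =>
    intro p m k ds hds hub
    simp only [List.foldl_cons, pvFoldB]
    by_cases hc : c > m
    · have hnotin : c ∉ p := fun hx => absurd (hub c hx) (by omega)
      have hidx : PySem.List.index? ds c = some p.length := by
        rw [PySem.List.index?_eq_some_iff]
        exact ⟨p, t, hds, rfl, hnotin⟩
      have := ih (p ++ [c]) c ((p.length : Int) + 1) ds
        (by simpa using hds)
        (by intro x hx; rcases List.mem_append.1 hx with h | h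
            · exact le_of_lt (lt_of_le_of_lt (hub x h) hc)
            · simp at h; omega)
      simp only [hidx, if_pos hc, Option.getD_some] at this ⊢
      simpa using this
    · have := ih (p ++ [c]) m k ds (by simpa using hds)
        (by intro x hx; rcases List.mem_append.1 hx with h | h
            · exact hub x h
            · simp at h; omega)
      simp only [if_neg hc] at this ⊢
      rw [this]; congr 1; simp

-- B's fold over range(a, b) equals the counter fold over the mapped differences starting at a.
lemma B_fold_eq (le : List Int) : ∀ (a b : Int) (s : Int × Int),
    (PySem.List.pyRange a b 1).foldl
      (fun (s : Int × Int) i =>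
        let d := PySem.List.pyGetD le (i + 1) 0 - PySem.List.pyGetD le i 0
        if d > s.1 then (d, i + 1) else s) s
    = pvFoldB ((PySem.List.pyRange a b 1).map
        (fun i => PySem.List.pyGetD le (i + 1) 0 - PySem.List.pyGetD le i 0)) a s := by
  intro a b
  suffices H : ∀ (n : Nat) (a : Int) (s : Int × Int), (b - a).toNat ≤ n →
      (PySem.List.pyRange a b 1).foldl
        (fun (s : Int × Int) i =>
          let d := PySem.List.pyGetD le (i + 1) 0 - PySem.List.pyGetD le i 0
          if d > s.1 then (d, i + 1) else s) s
      = pvFoldB ((PySem.List.pyRange a b 1).map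
          (fun i => PySem.List.pyGetD le (i + 1) 0 - PySem.List.pyGetD le i 0)) a s by
    exact fun s => H (b - a).toNat a s le_rfl
  intro n
  induction n with
  | zero =>
    intro a s h
    have hba : b ≤ a := by omega
    simp [PySem.List.pyRange_one_eq_nil hba, pvFoldB]
  | succ n ih =>
    intro a s h
    by_cases hab : a < b
    · rw [PySem.List.pyRange_one_cons hab]
      simp only [List.foldl_cons, List.map_cons, pvFoldB]
      exact ih (a + 1) _ (by omega)
    · have hba : b ≤ a := by omega
      simp [PySem.List.pyRange_one_eq_nil hba, pvFoldB]

-- ===== VERDICT (by name: the statement is the Claim_ definition above) =====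
theorem delta_max_spec : Claim_equal_delta_max := by
  intro le _
  unfold Spec_delta_max delta_max delta_max_alt
  dsimp only
  rw [B_fold_eq le 0 ((le.length : Int) - 1)]
  have h := A_fold_eq (pv_deltas le) [] (-1000000) 0 (pv_deltas le) (by simp) (by simp)
  rw [h, pv_deltas_eq_map]
  norm_num
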